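-- pv_equiv track=rewrite | github.com/MadMhessel/WebWork | rewrite.py | _prioritize_sentences
-- ===== SOURCE A (Python) =====
-- from typing import Iterable, List, Optional
--
-- def _prioritize_sentences(sentences: List[str], region_hints: Iterable[str], topic_hints: Iterable[str]) -> List[str]:
--     if not sentences: return sentences
--     def score(s: str) -> int:
--         sl = s.lower(); sc = 0
--         for h in region_hints:
--             if h in sl: sc += 2
--         for h in topic_hints:
--             if h in sl: sc += 1
--         return sc
--     indexed = list(enumerate(sentences))
--     indexed.sort(key=lambda t: (-score(t[1]), t[0]))
--     return [s for _, s in indexed]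
-- ===== SOURCE B (Python) =====
-- from typing import Iterable, List
--
-- def _prioritize_sentences(sentences: List[str], region_hints: Iterable[str], topic_hints: Iterable[str]) -> List[str]:
--     if not sentences: return sentences
--     def score(s: str) -> int:
--         sl = s.lower(); sc = 0
--         for h in region_hints:
--             if h in sl: sc += 2
--         for h in topic_hints:
--             if h in sl: sc += 1
--         return sc
--     scores = [score(s) for s in sentences]
--     out: List[str] = []
--     for sc in sorted(set(scores), reverse=True):
--         out += [s for s, c in zip(sentences, scores) if c == sc]
--     return out
-- ===== Notes on version B (the rewrite author's own statement) =====
-- stated objective: alternative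
-- what changed: Replaces the sort of (index, sentence) pairs under a tuple key by a bucket pass: scores are computed once into a parallel list, the distinct scores are taken in descending order, and equal-score sentences are emitted in original order per score group.
import Mathlib
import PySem

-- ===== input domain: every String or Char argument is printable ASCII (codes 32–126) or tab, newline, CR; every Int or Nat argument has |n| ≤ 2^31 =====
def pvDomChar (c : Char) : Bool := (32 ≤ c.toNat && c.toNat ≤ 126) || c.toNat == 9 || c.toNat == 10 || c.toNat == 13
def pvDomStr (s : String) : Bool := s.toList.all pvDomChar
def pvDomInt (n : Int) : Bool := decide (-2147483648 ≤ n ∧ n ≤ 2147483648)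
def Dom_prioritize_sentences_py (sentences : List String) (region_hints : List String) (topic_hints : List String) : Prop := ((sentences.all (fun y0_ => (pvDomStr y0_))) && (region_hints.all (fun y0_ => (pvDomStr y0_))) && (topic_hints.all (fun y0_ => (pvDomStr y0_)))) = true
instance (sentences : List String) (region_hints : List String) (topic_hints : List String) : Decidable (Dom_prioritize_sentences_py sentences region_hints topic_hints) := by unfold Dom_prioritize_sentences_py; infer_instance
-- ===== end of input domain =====

-- B replaces the tuple-key sort of (index, sentence) pairs by a bucket pass over descending distinct scores (objective: alternative).

-- ===== PORT A =====
-- the nested `score` closure, identical in A and in B (both Pythons define it verbatim)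
def pvScore (region_hints : List String) (topic_hints : List String) (s : String) : Int :=
  let sl := PySem.Str.lower s
  let sc : Int := 0
  let sc := region_hints.foldl (fun sc h => if PySem.Str.isIn h sl then sc + 2 else sc) sc
  let sc := topic_hints.foldl (fun sc h => if PySem.Str.isIn h sl then sc + 1 else sc) sc
  sc

def prioritize_sentences_py (sentences : List String) (region_hints : List String) (topic_hints : List String) : List String :=
  if sentences = [] then sentences
  else
    let indexed := PySem.List.enumerate sentences 0
    let sortedIndexed := PySem.List.sorted2 indexed
      (fun t => -(pvScore region_hints topic_hints t.2)) (fun t => t.1)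
    sortedIndexed.map (fun t => t.2)

-- ===== PORT B =====
def prioritize_sentences_py_alt (sentences : List String) (region_hints : List String) (topic_hints : List String) : List String :=
  if sentences = [] then sentences
  else
    let scores := sentences.map (pvScore region_hints topic_hints)
    (PySem.List.sorted (PySem.Set.ofList scores) (fun x => x) true).foldl
      (fun out sc => out ++ ((sentences.zip scores).filter (fun p => p.2 == sc)).map (fun p => p.1)) []

-- ===== PRECONDITION & SPEC =====
def Spec_prioritize_sentences_py (sentences : List String) (region_hints : List String) (topic_hints : List String) (out : List String) : Prop := out = prioritize_sentences_py_alt sentences region_hints topic_hints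
instance (sentences : List String) (region_hints : List String) (topic_hints : List String) (out : List String) : Decidable (Spec_prioritize_sentences_py sentences region_hints topic_hints out) := by unfold Spec_prioritize_sentences_py; infer_instance

-- ===== CLAIM (what is proved, stated in full; the proofs are below) =====
def Claim_equal_prioritize_sentences_py : Prop := ∀ (sentences : List String) (region_hints : List String) (topic_hints : List String), Dom_prioritize_sentences_py sentences region_hints topic_hints → Spec_prioritize_sentences_py sentences region_hints topic_hints (prioritize_sentences_py sentences region_hints topic_hints)

-- ===== LEMMAS AND PROOFS =====

-- insertBy only looks at `before` on the inserted element vs the list elements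
lemma insertBy_congr {α : Type} (b1 b2 : α → α → Bool) (x : α) (ys : List α)
    (h : ∀ y ∈ ys, b1 x y = b2 x y) :
    PySem.List.insertBy b1 x ys = PySem.List.insertBy b2 x ys := by
  induction ys with
  | nil => rfl
  | cons y ys ih =>
      simp only [PySem.List.insertBy]
      rw [h y (by simp)]
      by_cases hb : b2 x y = true
      · simp [hb]
      · simp [hb, ih (fun z hz => h z (by simp [hz]))]

lemma foldl_insertBy_congr {α : Type} (b1 b2 : α → α → Bool) (xs : List α) (acc : List α)
    (h : ∀ a b : α, (a ∈ xs ∨ a ∈ acc) → (b ∈ xs ∨ b ∈ acc) → b1 a b = b2 a b) :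
    xs.foldl (fun acc x => PySem.List.insertBy b1 x acc) acc
      = xs.foldl (fun acc x => PySem.List.insertBy b2 x acc) acc := by
  induction xs generalizing acc with
  | nil => rfl
  | cons x xs ih =>
      simp only [List.foldl_cons]
      rw [insertBy_congr b1 b2 x acc (fun y hy => h x y (Or.inl (by simp)) (Or.inr hy))]
      exact ih (PySem.List.insertBy b2 x acc) (fun a b ha hb => by
        apply h a b
        · rcases ha with ha | ha
          · exact Or.inl (by simp [ha])
          · rcases (PySem.List.mem_insertBy b2 x a acc).1 ha with h' | h'
            · exact Or.inl (by simp [h'])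
            · exact Or.inr h'
        · rcases hb with hb | hb
          · exact Or.inl (by simp [hb])
          · rcases (PySem.List.mem_insertBy b2 x b acc).1 hb with h' | h'
            · exact Or.inl (by simp [h'])
            · exact Or.inr h')

-- integer lexicographic order packed into one integer
lemma lex_pack (u v i j n : Int) (hi : 0 ≤ i) (hi' : i < n) (hj : 0 ≤ j) (hj' : j < n) :
    u * n + i < v * n + j ↔ (u < v ∨ (u = v ∧ i < j)) := by
  constructor
  · intro hlt
    rcases lt_trichotomy u v with h | h | h
    · exact Or.inl h
    · subst h; exact Or.inr ⟨rfl, by omega⟩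
    · exfalso
      have h1 : v + 1 ≤ u := by omega
      have := mul_le_mul_of_nonneg_right h1 (by omega : (0:ℤ) ≤ n)
      nlinarith
  · rintro (h | ⟨h, h2⟩)
    · have h1 : u + 1 ≤ v := by omega
      have := mul_le_mul_of_nonneg_right h1 (by omega : (0:ℤ) ≤ n)
      nlinarith
    · subst h; omega

lemma before_pack (u v i j n : Int) (hi : 0 ≤ i) (hi' : i < n) (hj : 0 ≤ j) (hj' : j < n) :
    (decide (u < v) || (!decide (v < u) && decide (i < j)))
      = decide (u * n + i < v * n + j) := by
  have hiff := lex_pack u v i j n hi hi' hj hj'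
  by_cases hK : u * n + i < v * n + j
  · rcases hiff.1 hK with h | ⟨h, h2⟩
    · simp [hK, h]
    · subst h; simp [hK, h2]
  · have hcon : ¬(u < v ∨ (u = v ∧ i < j)) := fun hc => hK (hiff.2 hc)
    rw [not_or] at hcon
    obtain ⟨h1, h2⟩ := hcon
    have h2 : u = v → ¬ i < j := fun he hij => h2 ⟨he, hij⟩
    by_cases hvu : v < u
    · simp [hK, h1, hvu]
    · have huv : u = v := by omega
      subst huv
      simp [hK, h2 rfl]

-- membership in enumerate xs 0 gives index bounds
lemma mem_enumerate_bounds {α : Type} (xs : List α) (t : Int × α)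
    (ht : t ∈ PySem.List.enumerate xs 0) : 0 ≤ t.1 ∧ t.1 < (xs.length : Int) := by
  rcases (PySem.List.mem_enumerate_iff _ _ _).1 ht with ⟨k, hk, rfl⟩
  simp; omega

-- the tuple-key sort of A equals a single-Int-key sort over enumerate
lemma sorted2_eq_sorted_pack (xs : List String) (f : String → Int) :
    PySem.List.sorted2 (PySem.List.enumerate xs 0)
      (fun t => -(f t.2)) (fun t => t.1)
      = PySem.List.sorted (PySem.List.enumerate xs 0)
          (fun t => -(f t.2) * (xs.length : Int) + t.1) := by
  show List.foldl _ [] _ = List.foldl _ [] _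
  apply foldl_insertBy_congr
  intro a b ha hb
  have ha' := mem_enumerate_bounds xs a (by tauto)
  have hb' := mem_enumerate_bounds xs b (by tauto)
  exact before_pack _ _ _ _ _ ha'.1 ha'.2 hb'.1 hb'.2

-- a flatMap of score-buckets is a permutation of the base list
lemma flatMap_filter_perm {α : Type} (ks : List Int) (E : List α) (g : α → Int)
    (hnd : ks.Nodup) (hall : ∀ t ∈ E, g t ∈ ks) :
    (ks.flatMap (fun k => E.filter (fun t => g t == k))).Perm E := by
  induction ks generalizing E with
  | nil =>
      cases E with
      | nil => simp
      | cons e E => exact absurd (hall e (by simp)) (by simp)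
  | cons k ks ih =>
      simp only [List.flatMap_cons]
      have hrw : ks.flatMap (fun k' => E.filter (fun t => g t == k'))
          = ks.flatMap (fun k' => (E.filter (fun t => !(g t == k))).filter (fun t => g t == k')) := by
        apply List.flatMap_congr
        intro k' hk'
        rw [List.filter_filter]
        apply List.filter_congr
        intro t _
        by_cases h : g t = k'
        · have : k' ≠ k := fun he => (by simp [he] at hk'; exact (List.nodup_cons.1 hnd).1 hk')
          simp [h, this]
        · simp [h]
      rw [hrw]
      have hperm := ih (E.filter (fun t => !(g t == k))) (List.Nodup.of_cons hnd)
        (fun t ht => by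
          have h1 := hall t (List.mem_of_mem_filter ht)
          have h2 := List.of_mem_filter ht
          simp at h2
          simpa [h2] using h1)
      exact List.Perm.trans (List.Perm.append_left _ hperm) (List.filter_append_perm _ E)


-- buckets listed by strictly descending score are strictly increasing under the packed key
lemma pairwise_flatMap_buckets {α : Type} (ks : List Int) (E : List (Int × α))
    (f : α → Int) (n : Int)
    (hks : ks.Pairwise (fun a b => b < a))
    (hb : ∀ t ∈ E, 0 ≤ t.1 ∧ t.1 < n)
    (hE : E.Pairwise (fun a b => a.1 < b.1)) :
    (ks.flatMap (fun sc => E.filter (fun t => f t.2 == sc))).Pairwise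
      (fun a b => -(f a.2) * n + a.1 < -(f b.2) * n + b.1) := by
  induction ks with
  | nil => simp
  | cons k ks ihd =>
      simp only [List.flatMap_cons]
      rw [List.pairwise_append]
      refine ⟨?_, ihd (List.pairwise_cons.1 hks).2, ?_⟩
      · have hsub : (E.filter (fun t => f t.2 == k)).Pairwise (fun a b => a.1 < b.1) :=
          hE.sublist List.filter_sublist
        refine List.Pairwise.imp_of_mem ?_ hsub
        intro a b ha hb' hab
        have hfa : f a.2 = k := by simpa using (List.of_mem_filter ha)
        have hfb : f b.2 = k := by simpa using (List.of_mem_filter hb')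
        rw [hfa, hfb]; omega
      · intro a ha b hb'
        rcases List.mem_flatMap.1 hb' with ⟨sc, hsc, hbf⟩
        have hfa : f a.2 = k := by simpa using (List.of_mem_filter ha)
        have hfb : f b.2 = sc := by simpa using (List.of_mem_filter hbf)
        have hlt : sc < k := (List.pairwise_cons.1 hks).1 sc hsc
        have hba := hb a (List.mem_of_mem_filter ha)
        have hbb := hb b (List.mem_of_mem_filter hbf)
        rw [hfa, hfb]
        have h1 : (-k + 1) ≤ -sc := by omega
        have h2 := mul_le_mul_of_nonneg_right h1 (by omega : (0:ℤ) ≤ n)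
        nlinarith [hba.1, hba.2, hbb.1, hbb.2]

-- zipping a list with its own image
lemma zip_map_self {α β : Type} (f : α → β) (l : List α) :
    l.zip (l.map f) = l.map (fun s => (s, f s)) := by
  induction l with
  | nil => rfl
  | cons x xs ih => simp [ih]

-- projecting the sentence out of a filtered enumerate
lemma map_snd_filter_enumerate {α : Type} (xs : List α) (s : Int) (p : α → Bool) :
    ((PySem.List.enumerate xs s).filter (fun t => p t.2)).map (fun t => t.2)
      = xs.filter p := by
  induction xs generalizing s with
  | nil => simp [PySem.List.enumerate_nil]
  | cons x xs ih =>
      rw [PySem.List.enumerate_cons]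
      by_cases h : p x = true
      · simp [h, ih]
      · simp at h; simp [h, ih]

-- ===== VERDICT (by name: the statement is the Claim_ definition above) =====
theorem prioritize_sentences_py_spec : Claim_equal_prioritize_sentences_py := by
  intro sentences region_hints topic_hints _
  unfold Spec_prioritize_sentences_py prioritize_sentences_py prioritize_sentences_py_alt
  by_cases hnil : sentences = []
  · simp [hnil]
  · simp only [if_neg hnil]
    set f := pvScore region_hints topic_hints with hf
    set n : Int := (sentences.length : Int) with hn
    set E := PySem.List.enumerate sentences 0 with hE
    set ds := PySem.List.sorted (PySem.Set.ofList (sentences.map f)) (fun x => x) true with hds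
    -- rewrite B
    rw [PySem.List.foldl_append_eq_flatMap]
    have hzip : sentences.zip (sentences.map f) = sentences.map (fun s => (s, f s)) :=
      zip_map_self f sentences
    rw [hzip]
    have hB : ∀ sc : Int,
        (((sentences.map (fun s => (s, f s))).filter (fun p => p.2 == sc)).map (fun p => p.1))
          = sentences.filter (fun s => f s == sc) := by
      intro sc
      rw [List.filter_map, List.map_map]
      simp [Function.comp_def]
    -- rewrite A
    rw [sorted2_eq_sorted_pack sentences f]
    have hds_nodup : ds.Nodup := by
      rw [hds]
      exact ((PySem.List.sorted_perm _ _ _).symm.nodup (PySem.Set.nodup_ofList _))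
    have hds_sorted : ds.Pairwise (fun a b => b < a) := by
      have h1 : ds.Pairwise (fun a b => b ≤ a) := by
        rw [hds]; exact PySem.List.sorted_pairwise_rev _ _
      have h2 : ds.Pairwise (fun a b => a ≠ b) := hds_nodup
      exact (h1.and h2).imp (fun h => lt_of_le_of_ne h.1 (Ne.symm h.2))
    have hmem_ds : ∀ t ∈ E, f t.2 ∈ ds := by
      intro t ht
      rw [hds, PySem.List.mem_sorted, PySem.Set.mem_ofList]
      rcases (PySem.List.mem_enumerate_iff _ _ _).1 ht with ⟨k, hk, rfl⟩
      exact List.mem_map.2 ⟨sentences[k], by simp, rfl⟩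
    have hperm : (ds.flatMap (fun sc => E.filter (fun t => f t.2 == sc))).Perm E :=
      flatMap_filter_perm ds E (fun t => f t.2) hds_nodup hmem_ds
    have hpw : (ds.flatMap (fun sc => E.filter (fun t => f t.2 == sc))).Pairwise
        (fun a b => -(f a.2) * n + a.1 < -(f b.2) * n + b.1) :=
      pairwise_flatMap_buckets ds E f n hds_sorted
        (fun t ht => mem_enumerate_bounds sentences t ht)
        (PySem.List.pairwise_lt_enumerate sentences 0)
    rw [PySem.List.sorted_eq_of_perm_of_pairwise_lt E
      (ds.flatMap (fun sc => E.filter (fun t => f t.2 == sc))) _ hperm hpw]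
    rw [List.map_flatMap]
    apply List.flatMap_congr
    intro sc _
    rw [hB sc]
    exact map_snd_filter_enumerate sentences 0 (fun s => f s == sc)
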